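-- pv_equiv track=rewrite | github.com/Al-Bee/Compsci-101-Assignment-1 | complete_game.py | check_valid_move
-- ===== SOURCE A (Python) =====
-- def check_valid_move(tiles, row_size, grid_size, your_move):
--
--     grid_array = [tiles[i:i+row_size] for i in range(0, grid_size, row_size)]
--     for i in range(len(grid_array)):
--         for j in range(len(grid_array[i])):
--             if grid_array[i][j] == your_move:
--                 tile_row = i
--                 tile_col = j
--     if (tile_row > 0
--     and grid_array[tile_row - 1][tile_col] == ''): return True # Check above
--     if (tile_row < len(grid_array) - 1
--     and grid_array[tile_row + 1][tile_col] == ''): return True # Check below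
--     if (tile_col > 0
--     and grid_array[tile_row][tile_col - 1] == ''): return True # Check left
--     if (tile_col < row_size - 1
--     and grid_array[tile_row][tile_col + 1] == ''): return True # Check right
--     else: return False
-- ===== SOURCE B (Python) =====
-- def check_valid_move(tiles, row_size, grid_size, your_move):
--     num_rows = len(range(0, grid_size, row_size))
--     limit = min(len(tiles), num_rows * row_size)
--     for i in range(limit):
--         if tiles[i] == your_move:
--             idx = i
--     tile_row, tile_col = divmod(idx, row_size)
--     if tile_row > 0 and tiles[idx - row_size] == '':
--         return True
--     if tile_row < num_rows - 1 and idx + row_size < len(tiles) and tiles[idx + row_size] == '':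
--         return True
--     if tile_col > 0 and tiles[idx - 1] == '':
--         return True
--     if tile_col < row_size - 1 and idx + 1 < len(tiles) and tiles[idx + 1] == '':
--         return True
--     return False
-- ===== Notes on version B (the rewrite author's own statement) =====
-- stated objective: alternative
-- what changed: B drops the 2D grid construction entirely: one flat scan of the tiles prefix keeps the last matching index, divmod recovers row/column, and the four neighbours are tested by flat-index offsets with bounds guards.
-- outside the precondition, e.g. on check_valid_move(['', 'y', '', 'z'], -2, -2, 'y'): A returns True, B raises UnboundLocalError
import Mathlib
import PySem

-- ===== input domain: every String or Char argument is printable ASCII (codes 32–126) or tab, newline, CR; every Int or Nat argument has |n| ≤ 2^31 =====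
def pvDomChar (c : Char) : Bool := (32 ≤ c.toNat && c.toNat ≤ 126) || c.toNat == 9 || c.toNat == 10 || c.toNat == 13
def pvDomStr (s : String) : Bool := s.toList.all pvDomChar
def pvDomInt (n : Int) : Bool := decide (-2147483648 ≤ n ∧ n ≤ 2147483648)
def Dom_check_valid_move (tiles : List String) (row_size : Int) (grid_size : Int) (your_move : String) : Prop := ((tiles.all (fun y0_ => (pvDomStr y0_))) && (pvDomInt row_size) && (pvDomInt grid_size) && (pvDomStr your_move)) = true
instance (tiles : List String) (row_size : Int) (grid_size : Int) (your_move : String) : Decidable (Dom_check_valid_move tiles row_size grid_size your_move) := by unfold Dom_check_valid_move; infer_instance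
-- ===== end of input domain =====

-- B replaces A's 2D grid construction by a single flat scan of the tiles prefix
-- (last matching index + divmod + flat-index neighbour offsets); equal on Pre_.


-- ===== PORT A =====
-- Literal port of A. Where Python raises (UnboundLocalError when your_move never
-- occurs, IndexError via pyGet? = none on ragged grids) this port just falls
-- through to false; all such inputs are excluded by Pre_check_valid_move.
def check_valid_move (tiles : List String) (row_size : Int) (grid_size : Int) (your_move : String) : Bool :=
  let grid_array : List (List String) :=
    (PySem.List.pyRange 0 grid_size row_size).map
      (fun i => PySem.List.slice tiles (some i) (some (i + row_size)))
  let pos : Option (Int × Int) :=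
    (PySem.List.enumerate grid_array 0).foldl
      (fun acc ir =>
        (PySem.List.enumerate ir.2 0).foldl
          (fun acc2 jt => if jt.2 == your_move then some (ir.1, jt.1) else acc2)
          acc)
      none
  match pos with
  | none => false   -- Python raises UnboundLocalError here; outside Pre_
  | some rc =>
    let tile_row := rc.1
    let tile_col := rc.2
    if decide (tile_row > 0) &&
        ((PySem.List.pyGet? grid_array (tile_row - 1)).bind
          (fun row => PySem.List.pyGet? row tile_col) == some "") then true
    else if decide (tile_row < (grid_array.length : Int) - 1) &&
        ((PySem.List.pyGet? grid_array (tile_row + 1)).bind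
          (fun row => PySem.List.pyGet? row tile_col) == some "") then true
    else if decide (tile_col > 0) &&
        ((PySem.List.pyGet? grid_array tile_row).bind
          (fun row => PySem.List.pyGet? row (tile_col - 1)) == some "") then true
    else if decide (tile_col < row_size - 1) &&
        ((PySem.List.pyGet? grid_array tile_row).bind
          (fun row => PySem.List.pyGet? row (tile_col + 1)) == some "") then true
    else false

-- ===== PORT B =====
-- Literal port of Source B: flat scan keeping the last matching index, then divmod
-- and flat-offset neighbour tests.
def check_valid_move_alt (tiles : List String) (row_size : Int) (grid_size : Int) (your_move : String) : Bool :=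
  let num_rows : Int := ((PySem.List.pyRange 0 grid_size row_size).length : Int)
  let limit : Int := min (tiles.length : Int) (num_rows * row_size)
  let idx? : Option Int :=
    (PySem.List.pyRange 0 limit 1).foldl
      (fun acc i => if PySem.List.pyGet? tiles i == some your_move then some i else acc) none
  match idx? with
  | none => false   -- Python raises UnboundLocalError here; outside Pre_
  | some idx =>
    let tile_row := PySem.Int.floordiv idx row_size
    let tile_col := PySem.Int.mod idx row_size
    if decide (tile_row > 0) && (PySem.List.pyGet? tiles (idx - row_size) == some "") then true
    else if decide (tile_row < num_rows - 1) && decide (idx + row_size < (tiles.length : Int)) &&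
        (PySem.List.pyGet? tiles (idx + row_size) == some "") then true
    else if decide (tile_col > 0) && (PySem.List.pyGet? tiles (idx - 1) == some "") then true
    else if decide (tile_col < row_size - 1) && decide (idx + 1 < (tiles.length : Int)) &&
        (PySem.List.pyGet? tiles (idx + 1) == some "") then true
    else false

-- ===== PRECONDITION & SPEC =====
-- Pre_ excludes exactly the inputs on which A raises (ValueError / UnboundLocalError /
-- IndexError: nonpositive sizes, no occurrence of your_move in the grid prefix, or an
-- out-of-range below/right neighbour access not short-circuited by an earlier empty
-- neighbour), plus the nonpositive-size inputs on which A's accidental negative-slice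
-- grid still returns a value while B raises UnboundLocalError.
def Pre_check_valid_move (tiles : List String) (row_size : Int) (grid_size : Int) (your_move : String) : Prop :=
  0 < row_size ∧ 0 < grid_size ∧
  ∃ i : Nat,
    i < min tiles.length (((grid_size + row_size - 1) / row_size).toNat * row_size.toNat) ∧
    tiles[i]? = some your_move ∧
    (∀ j : Nat, j < min tiles.length (((grid_size + row_size - 1) / row_size).toNat * row_size.toNat) →
      tiles[j]? = some your_move → j ≤ i) ∧
    (i + row_size.toNat < ((grid_size + row_size - 1) / row_size).toNat * row_size.toNat →
      (i + row_size.toNat < tiles.length ∨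
        (row_size.toNat ≤ i ∧ tiles[i - row_size.toNat]? = some ""))) ∧
    (i % row_size.toNat + 1 < row_size.toNat →
      (i + 1 < tiles.length ∨
        (row_size.toNat ≤ i ∧ tiles[i - row_size.toNat]? = some "") ∨
        (i + row_size.toNat < ((grid_size + row_size - 1) / row_size).toNat * row_size.toNat ∧
          i + row_size.toNat < tiles.length ∧ tiles[i + row_size.toNat]? = some "") ∨
        (1 ≤ i % row_size.toNat ∧ tiles[i - 1]? = some "")))
instance (tiles : List String) (row_size : Int) (grid_size : Int) (your_move : String) : Decidable (Pre_check_valid_move tiles row_size grid_size your_move) := by unfold Pre_check_valid_move; infer_instance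

def pvWitness_check_valid_move : List String × Int × Int × String := (["a", "", "b", "c"], 2, 4, "c")

def Spec_check_valid_move (tiles : List String) (row_size : Int) (grid_size : Int) (your_move : String) (out : Bool) : Prop := out = check_valid_move_alt tiles row_size grid_size your_move
instance (tiles : List String) (row_size : Int) (grid_size : Int) (your_move : String) (out : Bool) : Decidable (Spec_check_valid_move tiles row_size grid_size your_move out) := by unfold Spec_check_valid_move; infer_instance

-- ===== CLAIM (what is proved, stated in full; the proofs are below) =====
def Claim_equal_check_valid_move : Prop := ∀ (tiles : List String) (row_size : Int) (grid_size : Int) (your_move : String), Dom_check_valid_move tiles row_size grid_size your_move → Pre_check_valid_move tiles row_size grid_size your_move → Spec_check_valid_move tiles row_size grid_size your_move (check_valid_move tiles row_size grid_size your_move)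

-- ===== LEMMAS AND PROOFS =====

/-- Index of the LAST element of `l` equal to `mv` (what both loops keep). -/
def pvLastMatch (mv : String) : List String → Option Nat
  | [] => none
  | x :: xs =>
    match pvLastMatch mv xs with
    | some k => some (k + 1)
    | none => if x == mv then some 0 else none

theorem pvLastMatch_append (mv : String) (a b : List String) :
    pvLastMatch mv (a ++ b) =
      match pvLastMatch mv b with
      | some k => some (a.length + k)
      | none => pvLastMatch mv a := by
  induction a with
  | nil => simp [pvLastMatch]; cases pvLastMatch mv b <;> simp
  | cons x xs ih =>
    simp only [List.cons_append, pvLastMatch, ih]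
    cases pvLastMatch mv b with
    | none => rfl
    | some k => simp [List.length_cons]; omega

theorem pvLastMatch_none_spec (mv : String) (l : List String)
    (h : pvLastMatch mv l = none) :
    ∀ j : Nat, j < l.length → l[j]? ≠ some mv := by
  induction l with
  | nil => intro j hj; simp at hj
  | cons x xs ih =>
    simp only [pvLastMatch] at h
    cases hx : pvLastMatch mv xs with
    | some m => rw [hx] at h; simp at h
    | none =>
      rw [hx] at h
      by_cases hxm : x == mv
      · simp [hxm] at h
      · intro j hj
        cases j with
        | zero => simpa using (by simpa using hxm : ¬ x = mv)
        | succ j' =>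
          simpa using ih hx j' (by simpa using hj)

theorem pvLastMatch_some_spec (mv : String) (l : List String) :
    ∀ k : Nat, pvLastMatch mv l = some k →
    k < l.length ∧ l[k]? = some mv ∧ ∀ j : Nat, j < l.length → l[j]? = some mv → j ≤ k := by
  induction l with
  | nil => intro k h; simp [pvLastMatch] at h
  | cons x xs ih =>
    intro k h
    simp only [pvLastMatch] at h
    cases hx : pvLastMatch mv xs with
    | some m =>
      rw [hx] at h
      obtain ⟨h1, h2, h3⟩ := ih m hx
      injection h with h; subst h
      refine ⟨by simpa using h1, by simpa using h2, ?_⟩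
      intro j hj hjv
      cases j with
      | zero => omega
      | succ j' =>
        have := h3 j' (by simpa using hj) (by simpa using hjv)
        omega
    | none =>
      rw [hx] at h
      by_cases hxm : x == mv
      · simp [hxm] at h; subst h
        refine ⟨by simp, by simpa using eq_of_beq hxm, ?_⟩
        intro j hj hjv
        cases j with
        | zero => omega
        | succ j' =>
          exact absurd (by simpa using hjv)
            (pvLastMatch_none_spec mv xs hx j' (by simpa using hj))
      · simp [hxm] at h

def pvLastRC (mv : String) : List (List String) → Option (Nat × Nat)
  | [] => none
  | row :: rest =>
    match pvLastRC mv rest with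
    | some p => some (p.1 + 1, p.2)
    | none => (pvLastMatch mv row).map (fun c => (0, c))
theorem pvInnerFold_eq (mv : String) (row : List String) (iI : Int) :
    ∀ (s : Int) (acc : Option (Int × Int)),
    (PySem.List.enumerate row s).foldl
        (fun a2 jt => if jt.2 == mv then some (iI, jt.1) else a2) acc =
      match pvLastMatch mv row with
      | some k => some (iI, s + (k : Int))
      | none => acc := by
  induction row with
  | nil => intro s acc; simp [PySem.List.enumerate_nil, pvLastMatch]
  | cons x xs ih =>
    intro s acc
    rw [PySem.List.enumerate_cons, List.foldl_cons, ih]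
    simp only [pvLastMatch]
    cases pvLastMatch mv xs with
    | some k =>
      simp only []
      congr 2
      push_cast; ring
    | none =>
      by_cases hxm : x == mv <;> simp [hxm]

theorem pvOuterFold_eq (mv : String) (rows : List (List String)) :
    ∀ (s : Int) (acc : Option (Int × Int)),
    (PySem.List.enumerate rows s).foldl
        (fun acc ir =>
          (PySem.List.enumerate ir.2 0).foldl
            (fun acc2 jt => if jt.2 == mv then some (ir.1, jt.1) else acc2) acc) acc =
      match pvLastRC mv rows with
      | some p => some (s + (p.1 : Int), (p.2 : Int))
      | none => acc := by
  induction rows with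
  | nil => intro s acc; simp [PySem.List.enumerate_nil, pvLastRC]
  | cons row rest ih =>
    intro s acc
    rw [PySem.List.enumerate_cons, List.foldl_cons, ih, pvInnerFold_eq]
    simp only [pvLastRC]
    cases pvLastRC mv rest with
    | some p =>
      simp only []
      congr 2
      push_cast; ring
    | none =>
      cases pvLastMatch mv row with
      | some k => simp
      | none => simp

theorem pvLastRC_append_singleton (mv : String) (xs : List (List String)) (y : List String) :
    pvLastRC mv (xs ++ [y]) =
      match pvLastMatch mv y with
      | some c => some (xs.length, c)
      | none => pvLastRC mv xs := by
  induction xs with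
  | nil =>
    simp only [List.nil_append, pvLastRC]
    cases pvLastMatch mv y <;> simp
  | cons x xs ih =>
    simp only [List.cons_append, pvLastRC, ih]
    cases hy : pvLastMatch mv y with
    | some c => simp [List.length_cons]
    | none => rfl

theorem pvLastRC_chunks (mv : String) (tiles : List String) (rsN : Nat) (hrs : 0 < rsN) :
    ∀ n : Nat,
      pvLastRC mv ((List.range n).map (fun r => (tiles.drop (r * rsN)).take rsN)) =
        (pvLastMatch mv (tiles.take (n * rsN))).map (fun k => (k / rsN, k % rsN)) := by
  intro n
  induction n with
  | zero => simp [pvLastRC, pvLastMatch]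
  | succ n ih =>
    rw [List.range_succ, List.map_append, List.map_singleton, pvLastRC_append_singleton, ih]
    have htake : tiles.take ((n + 1) * rsN) =
        tiles.take (n * rsN) ++ (tiles.drop (n * rsN)).take rsN := by
      rw [Nat.succ_mul, List.take_add]
    rw [htake, pvLastMatch_append]
    cases hy : pvLastMatch mv ((tiles.drop (n * rsN)).take rsN) with
    | some c =>
      obtain ⟨hc, _, _⟩ := pvLastMatch_some_spec mv _ c hy
      have hclt : c < rsN := lt_of_lt_of_le hc (by simp)
      have hlen : n * rsN < tiles.length := by
        have := hc
        simp [List.length_take, List.length_drop] at this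
        omega
      have hlentake : (tiles.take (n * rsN)).length = n * rsN := by
        simp [List.length_take]; omega
      have hdiv : (n * rsN + c) / rsN = n := by
        rw [Nat.mul_comm, Nat.mul_add_div hrs, Nat.div_eq_of_lt hclt]
        omega
      have hmod : (n * rsN + c) % rsN = c := by
        rw [Nat.mul_comm, Nat.mul_add_mod, Nat.mod_eq_of_lt hclt]
      simp [hlentake, hdiv, hmod]
    | none =>
      cases pvLastMatch mv (tiles.take (n * rsN)) <;> simp

theorem pvFlatFold_eq (mv : String) (tiles : List String) :
    ∀ (t s : Nat), s + t ≤ tiles.length → ∀ acc : Option Int,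
    (PySem.List.pyRange (s : Int) ((s : Int) + (t : Int)) 1).foldl
        (fun a i => if PySem.List.pyGet? tiles i == some mv then some i else a) acc =
      match pvLastMatch mv ((tiles.drop s).take t) with
      | some k => some ((s + k : Nat) : Int)
      | none => acc := by
  intro t
  induction t with
  | zero =>
    intro s h acc
    rw [PySem.List.pyRange_one_eq_nil (by omega)]
    simp [pvLastMatch]
  | succ t ih =>
    intro s h acc
    have hs : s < tiles.length := by omega
    rw [PySem.List.pyRange_one_cons (by push_cast; omega), List.foldl_cons]
    have hshift : ((s : Int) + 1) = ((s + 1 : Nat) : Int) := by push_cast; ring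
    have hshift2 : ((s : Int) + ((t + 1 : Nat) : Int)) = (((s + 1 : Nat) : Int) + (t : Nat)) := by
      push_cast; ring
    rw [hshift2, hshift, ih (s + 1) (by omega)]
    rw [List.drop_eq_getElem_cons hs, List.take_succ_cons]
    simp only [pvLastMatch]
    cases pvLastMatch mv ((tiles.drop (s + 1)).take t) with
    | some k =>
      simp only []
      congr 1
      omega
    | none =>
      have hget : PySem.List.pyGet? tiles (s : Int) = some tiles[s] := by
        rw [PySem.List.pyGet?_natCast, List.getElem?_eq_getElem hs]
      rw [hget]
      by_cases hxm : tiles[s] == mv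
      · simp [hxm]
      · simp [hxm]

theorem pvFlatFold_zero (mv : String) (tiles : List String) (t : Nat) (h : t ≤ tiles.length)
    (acc : Option Int) :
    (PySem.List.pyRange 0 (t : Int) 1).foldl
        (fun a i => if PySem.List.pyGet? tiles i == some mv then some i else a) acc =
      match pvLastMatch mv (tiles.take t) with
      | some k => some ((k : Nat) : Int)
      | none => acc := by
  have h2 := pvFlatFold_eq mv tiles t 0 (by omega) acc
  simpa using h2

theorem pvGrid_get (tiles : List String) (rsN nN a b : Nat) (ha : a < nN) (hb : b < rsN) :
    ((PySem.List.pyGet? ((List.range nN).map (fun r => (tiles.drop (r * rsN)).take rsN)) (a : Int)).bind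
        (fun row => PySem.List.pyGet? row (b : Int))) = tiles[a * rsN + b]? := by
  rw [PySem.List.pyGet?_natCast]
  rw [List.getElem?_map]
  rw [List.getElem?_range ha]
  simp only [Option.map_some, Option.bind_some]
  rw [PySem.List.pyGet?_natCast]
  rw [List.getElem?_take]
  simp [hb, List.getElem?_drop]

theorem pvGrid_get_none (tiles : List String) (rsN nN a b : Nat) (ha : a < nN)
    (hlen : tiles.length ≤ a * rsN + b) :
    ((PySem.List.pyGet? ((List.range nN).map (fun r => (tiles.drop (r * rsN)).take rsN)) (a : Int)).bind
        (fun row => PySem.List.pyGet? row (b : Int))) = none := by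
  rw [PySem.List.pyGet?_natCast, List.getElem?_map, List.getElem?_range ha]
  simp only [Option.map_some, Option.bind_some]
  rw [PySem.List.pyGet?_natCast, List.getElem?_eq_none]
  simp only [List.length_take, List.length_drop]
  omega

theorem pvArith_above (rsN rN cN i : Nat) (h1 : 1 ≤ rN) (key : rsN * rN + cN = i) :
    (rN - 1) * rsN + cN = i - rsN := by
  obtain ⟨m, rfl⟩ := Nat.exists_eq_add_of_le h1
  subst key
  rw [Nat.add_sub_cancel_left, Nat.mul_add, Nat.mul_one, Nat.mul_comm m rsN]
  generalize rsN * m = q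
  omega

theorem pvArith_below2 (rsN rN cN i : Nat) (key : rsN * rN + cN = i) :
    (rN + 1) * rsN + cN = i + rsN := by
  subst key
  rw [Nat.add_mul, Nat.one_mul, Nat.mul_comm rN rsN]
  generalize rsN * rN = p
  omega

theorem pvArith_left (rsN rN cN i : Nat) (h1 : 1 ≤ cN) (key : rsN * rN + cN = i) :
    rN * rsN + (cN - 1) = i - 1 := by
  subst key
  rw [Nat.mul_comm rN rsN]
  generalize rsN * rN = p
  omega

theorem pvArith_right (rsN rN cN i : Nat) (key : rsN * rN + cN = i) :
    rN * rsN + (cN + 1) = i + 1 := by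
  subst key
  rw [Nat.mul_comm rN rsN]
  generalize rsN * rN = p
  omega

-- ===== VERDICT (by name: the statement is the Claim_ definition above) =====
theorem check_valid_move_spec : Claim_equal_check_valid_move := by
  intro tiles rs gs mv _hdom hpre
  obtain ⟨hrs, hgs, i, hiL, hit, hmax, -, -⟩ := hpre
  unfold Spec_check_valid_move
  set rsN : Nat := rs.toNat with hrsN_def
  set nN : Nat := ((gs + rs - 1) / rs).toNat with hnN_def
  set lenN : Nat := tiles.length with hlen_def
  set L : Nat := min lenN (nN * rsN) with hL_def
  have hrsN : 0 < rsN := by omega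
  have hrsE : rs = (rsN : Int) := by omega
  have hnNpos : 0 < nN := by
    have h1 : (1 : Int) ≤ (gs + rs - 1) / rs := by
      rw [Int.le_ediv_iff_mul_le hrs]; omega
    omega
  -- grid structure
  have E1 : PySem.List.pyRange 0 gs rs = (List.range nN).map (fun k => ((k * rsN : Nat) : Int)) := by
    rw [PySem.List.pyRange_of_pos 0 gs hrs, if_pos hgs]
    have hb : ((gs - 0 + rs - 1) / rs).toNat = nN := by
      have : gs - 0 + rs - 1 = gs + rs - 1 := by ring
      rw [this]
    rw [hb]
    apply List.map_congr_left
    intro k _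
    rw [hrsE]; push_cast; ring
  have E2 : ((List.range nN).map (fun k => ((k * rsN : Nat) : Int))).map
        (fun j => PySem.List.slice tiles (some j) (some (j + rs))) =
      (List.range nN).map (fun r => (tiles.drop (r * rsN)).take rsN) := by
    rw [List.map_map]
    apply List.map_congr_left
    intro k _
    show PySem.List.slice tiles (some ((k * rsN : Nat) : Int)) (some (((k * rsN : Nat) : Int) + rs)) = _
    rw [hrsE, PySem.List.slice_natCast_add]
  -- the last match of the flat prefix is exactly i
  have htake_eq : tiles.take L = tiles.take (nN * rsN) := by
    rw [List.take_eq_take_iff]; omega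
  have hflat_i : (tiles.take (nN * rsN))[i]? = some mv := by
    rw [List.getElem?_take, if_pos (by omega)]; exact hit
  have hflatlen : (tiles.take (nN * rsN)).length = L := by
    simp [List.length_take]; omega
  have hLM : pvLastMatch mv (tiles.take (nN * rsN)) = some i := by
    cases hlm : pvLastMatch mv (tiles.take (nN * rsN)) with
    | none =>
      exact absurd hflat_i (pvLastMatch_none_spec mv _ hlm i (by rw [hflatlen]; omega))
    | some k =>
      obtain ⟨hk1, hk2, hk3⟩ := pvLastMatch_some_spec mv _ k hlm
      have hk2' : tiles[k]? = some mv := by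
        rw [List.getElem?_take] at hk2
        by_cases h : k < nN * rsN
        · rwa [if_pos h] at hk2
        · rw [if_neg h] at hk2; exact absurd hk2 (by simp)
      rw [hflatlen] at hk1
      have h1 : k ≤ i := hmax k hk1 hk2'
      have h2 : i ≤ k := hk3 i (by rw [hflatlen]; omega) hflat_i
      have : k = i := le_antisymm h1 h2
      rw [this]
  -- basic arithmetic about i
  have key : rsN * (i / rsN) + i % rsN = i := Nat.div_add_mod i rsN
  set rN : Nat := i / rsN with hrN_def
  set cN : Nat := i % rsN with hcN_def
  have hcN : cN < rsN := Nat.mod_lt _ hrsN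
  have hrN : rN < nN := by
    rw [hrN_def, Nat.div_lt_iff_lt_mul hrsN]
    calc i < L := hiL
      _ ≤ nN * rsN := by omega
  have hmul : rsN * rN ≤ i := by omega
  -- reduce both ports
  simp only [check_valid_move, check_valid_move_alt, E1, E2]
  rw [pvOuterFold_eq, pvLastRC_chunks mv tiles rsN hrsN nN, hLM]
  have hnumlen : ((List.range nN).map (fun k => ((k * rsN : Nat) : Int))).length = nN := by simp
  simp only [hnumlen, Option.map_some, List.length_map, List.length_range]
  have hlim : min ((tiles.length : Int)) ((nN : Int) * rs) = ((L : Nat) : Int) := by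
    rw [hrsE]
    have h1 : ((nN : Int) * (rsN : Int)) = ((nN * rsN : Nat) : Int) := by push_cast; ring
    rw [h1, ← hlen_def]
    omega
  rw [hlim]
  rw [pvFlatFold_zero mv tiles L (by omega) none, htake_eq, hLM]
  simp only []
  -- divmod on the B side
  rw [hrsE, PySem.Int.floordiv_natCast, PySem.Int.mod_natCast]
  simp only [zero_add, ← hrN_def, ← hcN_def]
  set G := List.map (fun r => List.take rsN (List.drop (r * rsN) tiles)) (List.range nN) with hG
  -- above
  have c1 : (decide ((rN : Int) > 0) &&
        ((PySem.List.pyGet? G ((rN : Int) - 1)).bind fun a => PySem.List.pyGet? a (cN : Int)) == some "") =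
      (decide ((rN : Int) > 0) && PySem.List.pyGet? tiles ((i : Int) - (rsN : Int)) == some "") := by
    by_cases h : (0 : Int) < (rN : Int)
    · have h1 : 1 ≤ rN := by exact_mod_cast h
      have hrsle : rsN ≤ i := by
        calc rsN = rsN * 1 := by ring
          _ ≤ rsN * rN := Nat.mul_le_mul_left _ h1
          _ ≤ i := hmul
      have e1 : ((rN : Int) - 1) = ((rN - 1 : Nat) : Int) := by omega
      have e2 : ((i : Int) - (rsN : Int)) = ((i - rsN : Nat) : Int) := by omega
      have e3 : (rN - 1) * rsN + cN = i - rsN := pvArith_above rsN rN cN i h1 key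
      rw [hG, e1, e2, pvGrid_get tiles rsN nN (rN - 1) cN (by omega) hcN,
        PySem.List.pyGet?_natCast, e3]
    · have hd : decide ((rN : Int) > 0) = false := by simpa using h
      rw [hd]; simp
  -- below
  have c2 : (decide ((rN : Int) < (nN : Int) - 1) &&
        ((PySem.List.pyGet? G ((rN : Int) + 1)).bind fun a => PySem.List.pyGet? a (cN : Int)) == some "") =
      (decide ((rN : Int) < (nN : Int) - 1) && decide ((i : Int) + (rsN : Int) < (tiles.length : Int)) &&
        PySem.List.pyGet? tiles ((i : Int) + (rsN : Int)) == some "") := by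
    by_cases h : (rN : Int) < (nN : Int) - 1
    · have h2 : rN + 2 ≤ nN := by omega
      have e1 : ((rN : Int) + 1) = ((rN + 1 : Nat) : Int) := by push_cast; ring
      have e3 : (rN + 1) * rsN + cN = i + rsN := pvArith_below2 rsN rN cN i key
      by_cases hlen2 : i + rsN < tiles.length
      · have e2 : ((i : Int) + (rsN : Int)) = ((i + rsN : Nat) : Int) := by push_cast; ring
        have ed : decide ((i : Int) + (rsN : Int) < (tiles.length : Int)) = true := by
          simp; omega
        rw [ed, e1, e2, hG, pvGrid_get tiles rsN nN (rN + 1) cN (by omega) hcN,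
          PySem.List.pyGet?_natCast, e3]
        simp
      · have hlb : tiles.length ≤ (rN + 1) * rsN + cN := by rw [e3]; omega
        have ed : decide ((i : Int) + (rsN : Int) < (tiles.length : Int)) = false := by
          simp; omega
        rw [ed, e1, hG, pvGrid_get_none tiles rsN nN (rN + 1) cN (by omega) hlb]
        simp
    · have hd : decide ((rN : Int) < (nN : Int) - 1) = false := by simpa using h
      rw [hd]; simp
  -- left
  have c3 : (decide ((cN : Int) > 0) &&
        ((PySem.List.pyGet? G (rN : Int)).bind fun a => PySem.List.pyGet? a ((cN : Int) - 1)) == some "") =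
      (decide ((cN : Int) > 0) && PySem.List.pyGet? tiles ((i : Int) - 1) == some "") := by
    by_cases h : (0 : Int) < (cN : Int)
    · have h1 : 1 ≤ cN := by exact_mod_cast h
      have e1 : ((cN : Int) - 1) = ((cN - 1 : Nat) : Int) := by omega
      have e2 : ((i : Int) - 1) = ((i - 1 : Nat) : Int) := by omega
      have e3 : rN * rsN + (cN - 1) = i - 1 := pvArith_left rsN rN cN i h1 key
      rw [hG, e1, e2, pvGrid_get tiles rsN nN rN (cN - 1) hrN (by omega),
        PySem.List.pyGet?_natCast, e3]
    · have hd : decide ((cN : Int) > 0) = false := by simpa using h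
      rw [hd]; simp
  -- right
  have c4 : (decide ((cN : Int) < (rsN : Int) - 1) &&
        ((PySem.List.pyGet? G (rN : Int)).bind fun a => PySem.List.pyGet? a ((cN : Int) + 1)) == some "") =
      (decide ((cN : Int) < (rsN : Int) - 1) && decide ((i : Int) + 1 < (tiles.length : Int)) &&
        PySem.List.pyGet? tiles ((i : Int) + 1) == some "") := by
    by_cases h : (cN : Int) < (rsN : Int) - 1
    · have h1 : cN + 1 < rsN := by omega
      have e1 : ((cN : Int) + 1) = ((cN + 1 : Nat) : Int) := by push_cast; ring
      have e3 : rN * rsN + (cN + 1) = i + 1 := pvArith_right rsN rN cN i key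
      by_cases hlen2 : i + 1 < tiles.length
      · have e2 : ((i : Int) + 1) = ((i + 1 : Nat) : Int) := by push_cast; ring
        have ed : decide ((i : Int) + 1 < (tiles.length : Int)) = true := by simp; omega
        rw [ed, e1, e2, hG, pvGrid_get tiles rsN nN rN (cN + 1) hrN h1,
          PySem.List.pyGet?_natCast, e3]
        simp
      · have hlb : tiles.length ≤ rN * rsN + (cN + 1) := by rw [e3]; omega
        have ed : decide ((i : Int) + 1 < (tiles.length : Int)) = false := by simp; omega
        rw [ed, e1, hG, pvGrid_get_none tiles rsN nN rN (cN + 1) hrN hlb]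
        simp
    · have hd : decide ((cN : Int) < (rsN : Int) - 1) = false := by simpa using h
      rw [hd]; simp
  rw [c1, c2, c3, c4]
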